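-- pv_equiv track=rewrite | github.com/ktmeaton/advent-of-code-2024 | src/aoc24/day06.py | path_coords
-- ===== SOURCE A (Python) =====
-- def path_coords(x,y,d,grid):
--     w,h = len(grid[0]), len(grid)
--     if d == "right":
--         coords = [(x1,y) for x1 in range(x+1,w)]
--     elif d == "left":
--         coords = [(x1,y) for x1 in list(reversed(range(0,x)))]
--     elif d == "up":
--         coords = [(x,y1) for y1 in list(reversed(range(0,y)))]
--     elif d == "down":
--         coords = [(x,y1) for y1 in range(y+1,h)]
--
--     path = "".join([grid[y][x] for x,y in coords])
--     return(path, coords)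
-- ===== SOURCE B (Python) =====
-- def path_coords(x, y, d, grid):
--     w, h = len(grid[0]), len(grid)
--     if d == "right":
--         dx, dy = 1, 0
--     elif d == "left":
--         dx, dy = -1, 0
--     elif d == "up":
--         dx, dy = 0, -1
--     elif d == "down":
--         dx, dy = 0, 1
--     x1, y1 = x + dx, y + dy
--     coords = []
--     path = []
--     while 0 <= x1 < w and 0 <= y1 < h:
--         coords.append((x1, y1))
--         path.append(grid[y1][x1])
--         x1 += dx
--         y1 += dy
--     return ("".join(path), coords)
-- ===== Notes on version B (the rewrite author's own statement) =====
-- stated objective: alternative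
-- what changed: Replaces A's four direction-specific range comprehensions plus a separate join pass over grid lookups by a single parametrized (dx,dy) step-vector walk that collects the coordinates and the path characters in one bounded loop.
-- intended difference: When the walk starts off the grid (y outside [0,h) or x<-1 for right, x>w or y outside [0,h) for left, and symmetrically for up/down) while the comprehension range is nonempty, A returns out-of-grid coordinates and a path read through Python's negative-index wraparound (e.g. path_coords(0,-1,'right',[['a','b'],['d','e']]) = ('e',[(1,-1)])); B returns ('', []), the intended no-path answer for a walk starting outside the grid. — e.g. on path_coords(0, -1, "right", [["a","b"],["d","e"]]): A returns ("e", [(1, -1)]), B returns ("", [])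
import Mathlib
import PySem

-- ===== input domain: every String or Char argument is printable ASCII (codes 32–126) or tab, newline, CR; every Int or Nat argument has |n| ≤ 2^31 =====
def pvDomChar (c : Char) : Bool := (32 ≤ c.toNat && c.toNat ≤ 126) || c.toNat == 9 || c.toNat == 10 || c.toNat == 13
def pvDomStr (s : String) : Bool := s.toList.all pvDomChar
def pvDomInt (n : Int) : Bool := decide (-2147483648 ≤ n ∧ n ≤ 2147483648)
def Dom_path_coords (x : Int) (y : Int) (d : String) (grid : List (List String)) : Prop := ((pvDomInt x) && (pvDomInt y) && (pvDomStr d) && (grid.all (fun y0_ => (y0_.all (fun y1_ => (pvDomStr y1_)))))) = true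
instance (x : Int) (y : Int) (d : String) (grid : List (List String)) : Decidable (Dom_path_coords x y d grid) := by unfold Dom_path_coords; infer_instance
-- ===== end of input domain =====

-- B replaces A's four direction-specific comprehensions plus a separate join pass by one
-- parametrised (dx,dy) walk that collects coords and path cells in a single loop (objective: alternative).

-- ===== PORT A =====
def path_coords (x : Int) (y : Int) (d : String) (grid : List (List String)) : String × (List (Int × Int)) :=
  let w : Int := (PySem.List.pyGetD grid 0 []).length
  let h : Int := grid.length
  let coords : List (Int × Int) :=
    if d == "right" then (PySem.List.pyRange (x+1) w 1).map (fun x1 => (x1, y))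
    else if d == "left" then ((PySem.List.pyRange 0 x 1).reverse).map (fun x1 => (x1, y))
    else if d == "up" then ((PySem.List.pyRange 0 y 1).reverse).map (fun y1 => (x, y1))
    else if d == "down" then (PySem.List.pyRange (y+1) h 1).map (fun y1 => (x, y1))
    else []  -- Python raises UnboundLocalError for any other d; excluded by Pre_path_coords
  -- grid[y][x]: pyGetD is exact (negative-index wraparound); Pre_path_coords excludes IndexError
  let path : String := PySem.Str.join "" (coords.map (fun p => PySem.List.pyGetD (PySem.List.pyGetD grid p.2 []) p.1 ""))
  (path, coords)

-- ===== PORT B =====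
-- the while loop of Source B: step by (dx,dy) while inside the w×h box, collecting cells and coords;
-- fuel only makes the recursion total (inside Pre_ the walk needs at most w resp. h steps)
def pvWalk (grid : List (List String)) (w : Int) (h : Int) (dx : Int) (dy : Int) :
    Int → Int → Nat → List String × List (Int × Int)
  | _, _, 0 => ([], [])
  | x1, y1, fuel+1 =>
    if 0 ≤ x1 ∧ x1 < w ∧ 0 ≤ y1 ∧ y1 < h then
      let cell := PySem.List.pyGetD (PySem.List.pyGetD grid y1 []) x1 ""
      let rest := pvWalk grid w h dx dy (x1+dx) (y1+dy) fuel
      (cell :: rest.1, (x1, y1) :: rest.2)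
    else ([], [])

def path_coords_alt (x : Int) (y : Int) (d : String) (grid : List (List String)) : String × (List (Int × Int)) :=
  let w : Int := (PySem.List.pyGetD grid 0 []).length
  let h : Int := grid.length
  let s : Int × Int :=
    if d == "right" then (1, 0)
    else if d == "left" then (-1, 0)
    else if d == "up" then (0, -1)
    else if d == "down" then (0, 1)
    else (0, 0)  -- Python raises UnboundLocalError for any other d; excluded by Pre_path_coords
  let r := pvWalk grid w h s.1 s.2 (x + s.1) (y + s.2) (grid.length + (PySem.List.pyGetD grid 0 []).length + 1)
  (PySem.Str.join "" r.1, r.2)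

-- ===== PRECONDITION & SPEC =====
-- Pre_: exactly the inputs on which the Python A returns (no UnboundLocalError for an unknown
-- direction, no IndexError from grid[0] on an empty grid or from grid[y][x] going out of range).
def Pre_path_coords (x : Int) (y : Int) (d : String) (grid : List (List String)) : Prop :=
  grid ≠ [] ∧
  (let w : Int := (PySem.List.pyGetD grid 0 []).length
   let h : Int := grid.length
   (d = "right" ∧ (w ≤ x+1 ∨ (-h ≤ y ∧ y < h ∧
      -((PySem.List.pyGetD grid y []).length : Int) ≤ x+1 ∧ w ≤ ((PySem.List.pyGetD grid y []).length : Int)))) ∨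
   (d = "left" ∧ (x ≤ 0 ∨ (-h ≤ y ∧ y < h ∧ x ≤ ((PySem.List.pyGetD grid y []).length : Int)))) ∨
   (d = "up" ∧ (y ≤ 0 ∨ (y ≤ h ∧ ∀ i ∈ PySem.List.pyRange 0 y 1,
      -((PySem.List.pyGetD grid i []).length : Int) ≤ x ∧ x < ((PySem.List.pyGetD grid i []).length : Int)))) ∨
   (d = "down" ∧ (h ≤ y+1 ∨ (-h ≤ y+1 ∧ ∀ i ∈ PySem.List.pyRange (y+1) h 1,
      -((PySem.List.pyGetD grid i []).length : Int) ≤ x ∧ x < ((PySem.List.pyGetD grid i []).length : Int)))))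
instance (x : Int) (y : Int) (d : String) (grid : List (List String)) : Decidable (Pre_path_coords x y d grid) := by unfold Pre_path_coords; infer_instance
def pvWitness_path_coords : Int × Int × String × List (List String) := (0, 0, "right", [["a","b"],["c","d"]])

-- A walks off the grid: when the start point lies outside the grid (or the walk starts beyond it,
-- x < -1 / y < -1 / x > w / y > h) but the comprehension range is nonempty, A returns coordinates
-- outside the grid and a path read through Python's negative-index wraparound; B returns ("", []),
-- the intended "no path" answer for a walk that starts off the grid.
def D_path_coords (x : Int) (y : Int) (d : String) (grid : List (List String)) : Prop :=
  let w : Int := (PySem.List.pyGetD grid 0 []).length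
  let h : Int := grid.length
  (((d = "right" ∧ x+1 < w) ∨ (d = "left" ∧ 0 < x)) ∧ (y < 0 ∨ h ≤ y ∨ x < -1 ∨ w < x)) ∨
  (((d = "up" ∧ 0 < y) ∨ (d = "down" ∧ y+1 < h)) ∧ (x < 0 ∨ w ≤ x ∨ y < -1 ∨ h < y))
instance (x : Int) (y : Int) (d : String) (grid : List (List String)) : Decidable (D_path_coords x y d grid) := by unfold D_path_coords; infer_instance

def Spec_path_coords (x : Int) (y : Int) (d : String) (grid : List (List String)) (out : String × (List (Int × Int))) : Prop := ¬ D_path_coords x y d grid → out = path_coords_alt x y d grid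
instance (x : Int) (y : Int) (d : String) (grid : List (List String)) (out : String × (List (Int × Int))) : Decidable (Spec_path_coords x y d grid out) := by unfold Spec_path_coords; infer_instance

def pvDiffWitness_path_coords : Int × Int × String × List (List String) := (0, -1, "right", [["a","b"],["d","e"]])
def pvDiffWitnessOut_path_coords : (String × (List (Int × Int))) × (String × (List (Int × Int))) := (("e", [(1, -1)]), ("", []))

-- ===== CLAIM (what is proved, stated in full; the proofs are below) =====
def Claim_unchanged_path_coords : Prop := ∀ (x : Int) (y : Int) (d : String) (grid : List (List String)), Dom_path_coords x y d grid → Pre_path_coords x y d grid → Spec_path_coords x y d grid (path_coords x y d grid)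
def Claim_changed_path_coords : Prop := Dom_path_coords (pvDiffWitness_path_coords.1) (pvDiffWitness_path_coords.2.1) (pvDiffWitness_path_coords.2.2.1) (pvDiffWitness_path_coords.2.2.2) ∧ Pre_path_coords (pvDiffWitness_path_coords.1) (pvDiffWitness_path_coords.2.1) (pvDiffWitness_path_coords.2.2.1) (pvDiffWitness_path_coords.2.2.2) ∧ D_path_coords (pvDiffWitness_path_coords.1) (pvDiffWitness_path_coords.2.1) (pvDiffWitness_path_coords.2.2.1) (pvDiffWitness_path_coords.2.2.2) ∧ path_coords (pvDiffWitness_path_coords.1) (pvDiffWitness_path_coords.2.1) (pvDiffWitness_path_coords.2.2.1) (pvDiffWitness_path_coords.2.2.2) = pvDiffWitnessOut_path_coords.1 ∧ path_coords_alt (pvDiffWitness_path_coords.1) (pvDiffWitness_path_coords.2.1) (pvDiffWitness_path_coords.2.2.1) (pvDiffWitness_path_coords.2.2.2) = pvDiffWitnessOut_path_coords.2 ∧ pvDiffWitnessOut_path_coords.1 ≠ pvDiffWitnessOut_path_coords.2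
def Claim_exact_path_coords : Prop := ∀ (x : Int) (y : Int) (d : String) (grid : List (List String)), Dom_path_coords x y d grid → Pre_path_coords x y d grid → D_path_coords x y d grid → path_coords x y d grid ≠ path_coords_alt x y d grid

-- ===== LEMMAS AND PROOFS =====

theorem pvWalk_stop (grid : List (List String)) (w h dx dy x1 y1 : Int)
    (hg : ¬(0 ≤ x1 ∧ x1 < w ∧ 0 ≤ y1 ∧ y1 < h)) (fuel : Nat) :
    pvWalk grid w h dx dy x1 y1 fuel = ([], []) := by
  cases fuel <;> simp [pvWalk, hg]

theorem pvWalk_right (grid : List (List String)) (w h y : Int) (hy0 : 0 ≤ y) (hyh : y < h) :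
    ∀ (fuel : Nat) (x1 : Int), 0 ≤ x1 → (w - x1).toNat ≤ fuel →
    pvWalk grid w h 1 0 x1 y fuel =
      ((PySem.List.pyRange x1 w 1).map (fun a => PySem.List.pyGetD (PySem.List.pyGetD grid y []) a ""),
       (PySem.List.pyRange x1 w 1).map (fun a => (a, y))) := by
  intro fuel
  induction fuel with
  | zero =>
    intro x1 h0 hf
    rw [PySem.List.pyRange_one_eq_nil (by omega)]
    simp [pvWalk]
  | succ n ih =>
    intro x1 h0 hf
    by_cases hx : x1 < w
    · rw [PySem.List.pyRange_one_cons hx]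
      have := ih (x1+1) (by omega) (by omega)
      simp [pvWalk, h0, hx, hy0, hyh, this]
    · rw [PySem.List.pyRange_one_eq_nil (by omega)]
      simp [pvWalk, hx]

theorem pvWalk_left (grid : List (List String)) (w h y : Int) (hy0 : 0 ≤ y) (hyh : y < h) :
    ∀ (fuel : Nat) (x1 : Int), x1 < w → (x1+1).toNat ≤ fuel →
    pvWalk grid w h (-1) 0 x1 y fuel =
      (((PySem.List.pyRange 0 (x1+1) 1).reverse).map (fun a => PySem.List.pyGetD (PySem.List.pyGetD grid y []) a ""),
       ((PySem.List.pyRange 0 (x1+1) 1).reverse).map (fun a => (a, y))) := by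
  intro fuel
  induction fuel with
  | zero =>
    intro x1 hx hf
    rw [PySem.List.pyRange_one_eq_nil (by omega)]
    simp [pvWalk]
  | succ n ih =>
    intro x1 hx hf
    by_cases h0 : 0 ≤ x1
    · rw [PySem.List.pyRange_one_succ_right h0]
      have h' := ih (x1-1) (by omega) (by omega)
      rw [show x1 - 1 + 1 = x1 by ring] at h'
      have h'' := h'
      rw [show x1 - 1 = x1 + -1 by ring] at h''
      simp [pvWalk, h0, hx, hy0, hyh, h'']
    · rw [PySem.List.pyRange_one_eq_nil (by omega)]
      simp [pvWalk, h0]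

theorem pvWalk_down (grid : List (List String)) (w h x : Int) (hx0 : 0 ≤ x) (hxw : x < w) :
    ∀ (fuel : Nat) (y1 : Int), 0 ≤ y1 → (h - y1).toNat ≤ fuel →
    pvWalk grid w h 0 1 x y1 fuel =
      ((PySem.List.pyRange y1 h 1).map (fun b => PySem.List.pyGetD (PySem.List.pyGetD grid b []) x ""),
       (PySem.List.pyRange y1 h 1).map (fun b => (x, b))) := by
  intro fuel
  induction fuel with
  | zero =>
    intro y1 h0 hf
    rw [PySem.List.pyRange_one_eq_nil (by omega)]
    simp [pvWalk]
  | succ n ih =>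
    intro y1 h0 hf
    by_cases hy : y1 < h
    · rw [PySem.List.pyRange_one_cons hy]
      have := ih (y1+1) (by omega) (by omega)
      simp [pvWalk, h0, hy, hx0, hxw, this]
    · rw [PySem.List.pyRange_one_eq_nil (by omega)]
      simp [pvWalk, hy]

theorem pvWalk_up (grid : List (List String)) (w h x : Int) (hx0 : 0 ≤ x) (hxw : x < w) :
    ∀ (fuel : Nat) (y1 : Int), y1 < h → (y1+1).toNat ≤ fuel →
    pvWalk grid w h 0 (-1) x y1 fuel =
      (((PySem.List.pyRange 0 (y1+1) 1).reverse).map (fun b => PySem.List.pyGetD (PySem.List.pyGetD grid b []) x ""),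
       ((PySem.List.pyRange 0 (y1+1) 1).reverse).map (fun b => (x, b))) := by
  intro fuel
  induction fuel with
  | zero =>
    intro y1 hy hf
    rw [PySem.List.pyRange_one_eq_nil (by omega)]
    simp [pvWalk]
  | succ n ih =>
    intro y1 hy hf
    by_cases h0 : 0 ≤ y1
    · rw [PySem.List.pyRange_one_succ_right h0]
      have h' := ih (y1-1) (by omega) (by omega)
      rw [show y1 - 1 + 1 = y1 by ring] at h'
      have h'' := h'
      rw [show y1 - 1 = y1 + -1 by ring] at h''
      simp [pvWalk, h0, hy, hx0, hxw, h'']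
    · rw [PySem.List.pyRange_one_eq_nil (by omega)]
      simp [pvWalk, h0]

-- ===== VERDICT (by name: the statement is the Claim_ definition above) =====
theorem path_coords_spec : Claim_unchanged_path_coords := by
  intro x y d grid _ hpre
  unfold Spec_path_coords
  intro hnD
  unfold Pre_path_coords at hpre
  unfold D_path_coords at hnD
  obtain ⟨-, hd⟩ := hpre
  simp only at hd hnD
  set w : Int := ((PySem.List.pyGetD grid 0 []).length : Int) with hw
  set h : Int := (grid.length : Int) with hh
  rcases hd with ⟨hd, -⟩ | ⟨hd, -⟩ | ⟨hd, -⟩ | ⟨hd, -⟩ <;> subst hd <;>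
    unfold path_coords path_coords_alt <;>
    simp only [← hw, ← hh, beq_self_eq_true, if_true, beq_iff_eq, String.reduceEq,
      if_false, add_zero]
  · -- right
    by_cases hxw : x + 1 < w
    · have hb : (0 ≤ y ∧ y < h) ∧ -1 ≤ x := by
        by_contra hcon
        exact hnD (Or.inl ⟨Or.inl ⟨rfl, hxw⟩, by omega⟩)
      rw [pvWalk_right grid w h y hb.1.1 hb.1.2 _ (x+1) (by omega) (by omega)]
      simp [List.map_map, Function.comp_def]
    · rw [PySem.List.pyRange_one_eq_nil (by omega),
        pvWalk_stop grid w h 1 0 (x+1) y (by omega)]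
      simp
  · -- left
    by_cases hx0 : 0 < x
    · have hb : (0 ≤ y ∧ y < h) ∧ x ≤ w := by
        by_contra hcon
        exact hnD (Or.inl ⟨Or.inr ⟨rfl, hx0⟩, by omega⟩)
      rw [pvWalk_left grid w h y hb.1.1 hb.1.2 _ (x + -1) (by omega) (by omega),
        show x + -1 + 1 = x by ring]
      simp [List.map_map, Function.comp_def]
    · rw [PySem.List.pyRange_one_eq_nil (by omega),
        pvWalk_stop grid w h (-1) 0 (x + -1) y (by omega)]
      simp
  · -- up
    by_cases hy0 : 0 < y
    · have hb : (0 ≤ x ∧ x < w) ∧ y ≤ h := by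
        by_contra hcon
        exact hnD (Or.inr ⟨Or.inl ⟨rfl, hy0⟩, by omega⟩)
      rw [pvWalk_up grid w h x hb.1.1 hb.1.2 _ (y + -1) (by omega) (by omega),
        show y + -1 + 1 = y by ring]
      simp [List.map_map, Function.comp_def]
    · rw [PySem.List.pyRange_one_eq_nil (by omega),
        pvWalk_stop grid w h 0 (-1) x (y + -1) (by omega)]
      simp
  · -- down
    by_cases hyh : y + 1 < h
    · have hb : (0 ≤ x ∧ x < w) ∧ -1 ≤ y := by
        by_contra hcon
        exact hnD (Or.inr ⟨Or.inr ⟨rfl, hyh⟩, by omega⟩)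
      rw [pvWalk_down grid w h x hb.1.1 hb.1.2 _ (y+1) (by omega) (by omega)]
      simp [List.map_map, Function.comp_def]
    · rw [PySem.List.pyRange_one_eq_nil (by omega),
        pvWalk_stop grid w h 0 1 x (y+1) (by omega)]
      simp

theorem path_coords_changed : Claim_changed_path_coords := by
  unfold Claim_changed_path_coords; decide

theorem path_coords_tight : Claim_exact_path_coords := by
  intro x y d grid _ _ hD heq
  unfold D_path_coords at hD
  simp only at hD
  set w : Int := ((PySem.List.pyGetD grid 0 []).length : Int) with hw
  set h : Int := (grid.length : Int) with hh
  have h2 := congrArg Prod.snd heq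
  rcases hD with ⟨⟨hd, hne⟩ | ⟨hd, hne⟩, hout⟩ | ⟨⟨hd, hne⟩ | ⟨hd, hne⟩, hout⟩ <;> subst hd <;>
    unfold path_coords path_coords_alt at h2 <;>
    simp only [← hw, ← hh, beq_self_eq_true, if_true, beq_iff_eq, String.reduceEq,
      if_false, add_zero] at h2
  · rw [pvWalk_stop grid w h 1 0 (x+1) y (by omega),
      PySem.List.pyRange_one_cons hne] at h2
    simp at h2
  · rw [pvWalk_stop grid w h (-1) 0 (x + -1) y (by omega),
      PySem.List.pyRange_one_cons hne] at h2
    simp at h2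
  · rw [pvWalk_stop grid w h 0 (-1) x (y + -1) (by omega),
      PySem.List.pyRange_one_cons hne] at h2
    simp at h2
  · rw [pvWalk_stop grid w h 0 1 x (y+1) (by omega),
      PySem.List.pyRange_one_cons hne] at h2
    simp at h2
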